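-- pv_equiv track=rewrite | github.com/AINative-Studio/Agent-402 | scripts/standardize_documentation.py | add_env_setup
-- ===== SOURCE A (Python) =====
-- ENV_SETUP_BLOCK = """## Environment Setup
--
-- ```bash
-- # Set standard environment variables
-- export API_KEY="your_api_key_here"
-- export PROJECT_ID="proj_abc123"
-- export BASE_URL="https://api.ainative.studio"
-- ```
--
-- """
--
-- def add_env_setup(content: str) -> str:
--     """Add environment setup block at appropriate location"""
--     lines = content.split('\n')
--     result = []
--     added = False
--
--     for i, line in enumerate(lines):
--         result.append(line)
--
--         # Add after first heading section (usually Overview or similar)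
--         if not added and line.startswith('##') and i > 10:
--             # Check if next few lines might be good place
--             next_section = '\n'.join(lines[i+1:i+5])
--             if 'curl' in next_section or 'Example' in next_section:
--                 result.append('')
--                 result.append(ENV_SETUP_BLOCK.rstrip())
--                 result.append('')
--                 added = True
--
--     return '\n'.join(result) if added else content
-- ===== SOURCE B (Python) =====
-- ENV_SETUP_BLOCK = """## Environment Setup
--
-- ```bash
-- # Set standard environment variables
-- export API_KEY="your_api_key_here"
-- export PROJECT_ID="proj_abc123"
-- export BASE_URL="https://api.ainative.studio"
-- ```
--
-- """
--
--
-- def add_env_setup(content: str) -> str: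
--     """Add environment setup block at appropriate location.
--
--     Find-then-splice: locate the first qualifying heading, then splice
--     the setup block in by slicing; no build-while-scanning accumulator."""
--     lines = content.split('\n')
--     idx = None
--     for i, line in enumerate(lines):
--         if line.startswith('##') and i > 10:
--             nearby = '\n'.join(lines[i + 1:i + 5])
--             if 'curl' in nearby or 'Example' in nearby:
--                 idx = i
--                 break
--     if idx is None:
--         return content
--     return '\n'.join(lines[:idx + 1] + ['', ENV_SETUP_BLOCK.rstrip(), ''] + lines[idx + 1:])
-- ===== Notes on version B (the rewrite author's own statement) =====
-- stated objective: simpler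
-- what changed: Replaces A's build-while-scanning accumulator loop (append every line, conditionally append the block mid-scan, keep scanning with a flag) with a find-first-index-then-splice decomposition: locate the insertion index with an early-exit scan, then build the result once by list slicing.
import Mathlib
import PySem

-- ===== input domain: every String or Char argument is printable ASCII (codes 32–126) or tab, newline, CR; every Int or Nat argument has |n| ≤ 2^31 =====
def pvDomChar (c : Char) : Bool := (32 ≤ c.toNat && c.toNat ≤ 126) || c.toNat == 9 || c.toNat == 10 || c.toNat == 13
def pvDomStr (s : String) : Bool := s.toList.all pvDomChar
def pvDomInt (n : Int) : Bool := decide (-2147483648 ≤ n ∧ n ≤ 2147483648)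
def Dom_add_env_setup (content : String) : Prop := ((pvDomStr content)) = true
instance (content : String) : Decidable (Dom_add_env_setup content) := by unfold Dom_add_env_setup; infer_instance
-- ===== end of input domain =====

-- B replaces A's build-while-scanning accumulator loop with a find-first-index-then-splice
-- decomposition (objective: simpler).

-- shared module constant ENV_SETUP_BLOCK
def ENV_SETUP_BLOCK : String := "## Environment Setup\n\n```bash\n# Set standard environment variables\nexport API_KEY=\"your_api_key_here\"\nexport PROJECT_ID=\"proj_abc123\"\nexport BASE_URL=\"https://api.ainative.studio\"\n```\n\n"

-- the shared insertion condition: line.startswith('##') and i > 10 and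
-- ('curl' in '\n'.join(lines[i+1:i+5]) or 'Example' in it)
def condAt (lines : List String) (i : Int) (line : String) : Bool :=
  PySem.Str.startswith line "##" && decide (i > 10) &&
    (let nextSection := PySem.Str.join "\n" (PySem.List.slice lines (some (i + 1)) (some (i + 5)))
     PySem.Str.isIn "curl" nextSection || PySem.Str.isIn "Example" nextSection)

-- ===== PORT A =====
-- A's for-loop over enumerate(lines) with accumulator (result, added)
def loopA (lines : List String) : Nat → List String → List String → Bool → List String × Bool
  | _, [], res, added => (res, added)
  | i, l :: rest, res, added =>
    let res := res ++ [l]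
    if !added && condAt lines (i : Int) l then
      loopA lines (i + 1) rest (res ++ ["", PySem.Str.rstrip ENV_SETUP_BLOCK, ""]) true
    else
      loopA lines (i + 1) rest res added

def add_env_setup (content : String) : String :=
  let lines := (PySem.Str.split? content "\n").getD []
  let r := loopA lines 0 lines [] false
  if r.2 then PySem.Str.join "\n" r.1 else content

-- ===== PORT B =====
-- B's early-exit search for the first qualifying index
def findIdxB (lines : List String) : Nat → List String → Option Nat
  | _, [] => none
  | i, l :: rest => if condAt lines (i : Int) l then some i else findIdxB lines (i + 1) rest

def add_env_setup_alt (content : String) : String :=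
  let lines := (PySem.Str.split? content "\n").getD []
  match findIdxB lines 0 lines with
  | none => content
  | some i =>
    PySem.Str.join "\n"
      (PySem.List.slice lines none (some ((i : Int) + 1)) ++
        ["", PySem.Str.rstrip ENV_SETUP_BLOCK, ""] ++
        PySem.List.slice lines (some ((i : Int) + 1)) none)

-- ===== PRECONDITION & SPEC =====
def Spec_add_env_setup (content : String) (out : String) : Prop := out = add_env_setup_alt content
instance (content : String) (out : String) : Decidable (Spec_add_env_setup content out) := by unfold Spec_add_env_setup; infer_instance

-- ===== CLAIM (what is proved, stated in full; the proofs are below) =====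
def Claim_equal_add_env_setup : Prop := ∀ (content : String), Dom_add_env_setup content → Spec_add_env_setup content (add_env_setup content)

-- ===== LEMMAS AND PROOFS =====

theorem loopA_true (lines : List String) :
    ∀ (rest : List String) (k : Nat) (res : List String),
      loopA lines k rest res true = (res ++ rest, true) := by
  intro rest
  induction rest with
  | nil => intro k res; simp [loopA]
  | cons l t ih => intro k res; simp [loopA, ih, List.append_assoc]

theorem findIdxB_ge (lines : List String) :
    ∀ (rest : List String) (k j : Nat),
      findIdxB lines k rest = some j → k ≤ j := by
  intro rest
  induction rest with
  | nil => intro k j h; simp [findIdxB] at h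
  | cons l t ih =>
    intro k j h
    simp only [findIdxB] at h
    split at h
    · injection h with h; omega
    · have := ih (k + 1) j h; omega

theorem loopA_eq_find (lines : List String) :
    ∀ (rest : List String) (k : Nat) (res : List String),
      loopA lines k rest res false =
        match findIdxB lines k rest with
        | none => (res ++ rest, false)
        | some j =>
          (res ++ rest.take (j - k + 1) ++ ["", PySem.Str.rstrip ENV_SETUP_BLOCK, ""] ++
            rest.drop (j - k + 1), true) := by
  intro rest
  induction rest with
  | nil => intro k res; simp [loopA, findIdxB]
  | cons l t ih =>
    intro k res
    simp only [loopA, findIdxB]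
    by_cases hc : condAt lines (k : Int) l = true
    · simp [hc, loopA_true, List.append_assoc]
    · simp only [hc, Bool.not_false, Bool.true_and]
      rw [ih (k + 1) (res ++ [l])]
      cases hf : findIdxB lines (k + 1) t with
      | none => simp
      | some j =>
        have hj : k + 1 ≤ j := findIdxB_ge lines t (k + 1) j hf
        have h1 : j - k + 1 = (j - (k + 1) + 1) + 1 := by omega
        simp [h1, List.take_succ_cons, List.drop_succ_cons, List.append_assoc]

theorem add_env_setup_eq (content : String) :
    add_env_setup content = add_env_setup_alt content := by
  unfold add_env_setup add_env_setup_alt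
  set L := (PySem.Str.split? content "\n").getD [] with hL
  dsimp only
  rw [loopA_eq_find]
  cases hf : findIdxB L 0 L with
  | none => simp
  | some j =>
    dsimp only
    have h1 : (j : Int) + 1 = ((j + 1 : Nat) : Int) := by push_cast; ring
    rw [h1, PySem.List.slice_to_natCast, PySem.List.slice_from_natCast]
    simp

-- ===== VERDICT (by name: the statement is the Claim_ definition above) =====
theorem add_env_setup_spec : Claim_equal_add_env_setup := by
  intro content _
  unfold Spec_add_env_setup
  exact add_env_setup_eq content
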